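-- pv_equiv track=rewrite | github.com/codessabuisnessmail-alt/Osint | scraper/cookie_manager.py | _organize_cookies_by_domain
-- ===== SOURCE A (Python) =====
-- from typing import Dict, List, Optional, Any
--
-- def _organize_cookies_by_domain(cookies: List[Dict]) -> Dict[str, List[Dict]]:
--     """Organize cookies by domain"""
--     organized = {}
--
--     for cookie in cookies:
--         domain = cookie.get('domain', '')
--         if domain:
--             # Remove leading dot for consistency
--             if domain.startswith('.'):
--                 domain = domain[1:]
--
--             if domain not in organized:
--                 organized[domain] = []
--             organized[domain].append(cookie)
--
--     return organized
-- ===== SOURCE B (Python) =====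
-- from typing import Dict, List
--
-- def _organize_cookies_by_domain(cookies: List[Dict]) -> Dict[str, List[Dict]]:
--     """Organize cookies by domain (two-pass: dedup keys, then gather per key)"""
--     def norm(cookie):
--         d = cookie.get('domain', '')
--         return d[1:] if d.startswith('.') else d
--
--     keyed = [(norm(c), c) for c in cookies if c.get('domain', '')]
--     keys = list(dict.fromkeys(k for k, _ in keyed))
--     return {k: [c for kk, c in keyed if kk == k] for k in keys}
-- ===== Notes on version B (the rewrite author's own statement) =====
-- stated objective: alternative
-- what changed: Replaces A's single incremental scan that mutates a dict (conditional key creation plus append per cookie) with a two-pass plan: normalize-and-filter the cookies once, dedup the normalized domains in first-occurrence order, then build each group by filtering the keyed list per domain.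
import Mathlib
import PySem

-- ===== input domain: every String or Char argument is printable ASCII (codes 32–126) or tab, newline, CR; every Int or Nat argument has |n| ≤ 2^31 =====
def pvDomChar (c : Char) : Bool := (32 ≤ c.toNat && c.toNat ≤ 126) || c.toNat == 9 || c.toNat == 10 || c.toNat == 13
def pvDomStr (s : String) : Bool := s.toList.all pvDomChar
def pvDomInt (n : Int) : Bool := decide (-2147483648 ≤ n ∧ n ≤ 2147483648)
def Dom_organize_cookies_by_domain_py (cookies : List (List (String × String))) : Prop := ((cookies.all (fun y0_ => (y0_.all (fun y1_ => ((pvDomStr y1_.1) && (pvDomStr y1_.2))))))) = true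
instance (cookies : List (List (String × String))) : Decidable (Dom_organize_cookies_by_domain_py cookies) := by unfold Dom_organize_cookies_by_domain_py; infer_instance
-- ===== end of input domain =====

-- B replaces A's single incremental dict-append scan by a two-pass plan (dedup the
-- normalized domains, then gather each group by a filter); objective: alternative.

-- ===== PORT A =====
def organize_cookies_by_domain_py (cookies : List (List (String × String))) : List (String × List (List (String × String))) :=
  (cookies.foldl (fun organized cookie =>
      let domain := (PySem.Dict.mk cookie).getD "domain" ""
      if domain ≠ "" then
        let domain := if PySem.Str.startswith domain "." then PySem.Str.slice domain (some 1) none else domain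
        let organized := if organized.contains domain then organized else organized.insert domain []
        organized.modify domain [] (· ++ [cookie])
      else organized)
    PySem.Dict.empty).items

-- ===== PORT B =====
def pvNormDomain (cookie : List (String × String)) : String :=
  let d := (PySem.Dict.mk cookie).getD "domain" ""
  if PySem.Str.startswith d "." then PySem.Str.slice d (some 1) none else d

def organize_cookies_by_domain_py_alt (cookies : List (List (String × String))) : List (String × List (List (String × String))) :=
  let keyed := (cookies.filter (fun c => (PySem.Dict.mk c).getD "domain" "" ≠ "")).map (fun c => (pvNormDomain c, c))
  let keys := PySem.List.dedup (keyed.map (·.1))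
  keys.map (fun k => (k, (keyed.filter (fun p => p.1 == k)).map (·.2)))

-- ===== PRECONDITION & SPEC =====
def Spec_organize_cookies_by_domain_py (cookies : List (List (String × String))) (out : List (String × List (List (String × String)))) : Prop := out = organize_cookies_by_domain_py_alt cookies
instance (cookies : List (List (String × String))) (out : List (String × List (List (String × String)))) : Decidable (Spec_organize_cookies_by_domain_py cookies out) := by unfold Spec_organize_cookies_by_domain_py; infer_instance

-- ===== CLAIM (what is proved, stated in full; the proofs are below) =====
def Claim_equal_organize_cookies_by_domain_py : Prop := ∀ (cookies : List (List (String × String))), Dom_organize_cookies_by_domain_py cookies → Spec_organize_cookies_by_domain_py cookies (organize_cookies_by_domain_py cookies)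

-- ===== LEMMAS AND PROOFS =====

-- A's "if k not in d: d[k] = []" followed by "d[k].append(v)" is one modify step.
theorem pv_guard_modify {κ ν : Type} [BEq κ] [LawfulBEq κ] (d : PySem.Dict κ ν) (k : κ) (f : ν → ν) (d0 : ν) :
    (if d.contains k then d else d.insert k d0).modify k d0 f = d.modify k d0 f := by
  by_cases h : d.contains k
  · simp [h]
  · simp only [if_neg h, PySem.Dict.modify, PySem.Dict.getD_insert_self,
      PySem.Dict.insert_insert_self,
      PySem.Dict.getD_of_not_contains d d0 (by simpa using h)]

-- A's loop over all cookies equals the modify-append loop over the keyed, filtered list.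
theorem pv_fold_eq (l : List (List (String × String))) (d : PySem.Dict String (List (List (String × String)))) :
    (l.foldl (fun organized cookie =>
      let domain := (PySem.Dict.mk cookie).getD "domain" ""
      if domain ≠ "" then
        let domain := if PySem.Str.startswith domain "." then PySem.Str.slice domain (some 1) none else domain
        let organized := if organized.contains domain then organized else organized.insert domain []
        organized.modify domain [] (· ++ [cookie])
      else organized) d) =
    (((l.filter (fun c => (PySem.Dict.mk c).getD "domain" "" ≠ "")).map
        (fun c => (pvNormDomain c, c))).foldl
      (fun d p => d.modify p.1 [] (· ++ [p.2])) d) := by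
  induction l generalizing d with
  | nil => rfl
  | cons c l ih =>
    by_cases h : (PySem.Dict.mk c).getD "domain" "" ≠ ""
    · rw [List.foldl_cons, List.filter_cons, if_pos (show _ = true by simpa using h),
        List.map_cons, List.foldl_cons, ih]
      congr 1
      beta_reduce
      rw [if_pos h]
      exact pv_guard_modify d (pvNormDomain c) (· ++ [c]) []
    · rw [List.foldl_cons, List.filter_cons, if_neg (show ¬ _ = true by simpa using h), ih]
      congr 1
      beta_reduce
      rw [if_neg h]

theorem organize_eq (cookies : List (List (String × String))) :
    organize_cookies_by_domain_py cookies = organize_cookies_by_domain_py_alt cookies := by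
  unfold organize_cookies_by_domain_py organize_cookies_by_domain_py_alt
  -- collapse A's per-cookie step into a single modify, then filter out skipped cookies
  have hstep : (cookies.foldl (fun organized cookie =>
      let domain := (PySem.Dict.mk cookie).getD "domain" ""
      if domain ≠ "" then
        let domain := if PySem.Str.startswith domain "." then PySem.Str.slice domain (some 1) none else domain
        let organized := if organized.contains domain then organized else organized.insert domain []
        organized.modify domain [] (· ++ [cookie])
      else organized)
    PySem.Dict.empty) =
    (((cookies.filter (fun c => (PySem.Dict.mk c).getD "domain" "" ≠ "")).map
        (fun c => (pvNormDomain c, c))).foldl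
      (fun d p => d.modify p.1 [] (· ++ [p.2])) PySem.Dict.empty) :=
    pv_fold_eq cookies PySem.Dict.empty
  rw [hstep]
  set keyed := ((cookies.filter (fun c => (PySem.Dict.mk c).getD "domain" "" ≠ "")).map
      (fun c => (pvNormDomain c, c))) with hkeyed
  set D := keyed.foldl (fun d p => d.modify p.1 [] (· ++ [p.2])) PySem.Dict.empty with hD
  have hkeys : D.keys = PySem.List.dedup (keyed.map (·.1)) := by
    rw [hD, PySem.Dict.keys_foldl_modify_key]
    simp [PySem.List.dedup_eq_ofList, PySem.Set.update_nil_left, PySem.Dict.keys_empty]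
  have hnodup : D.keys.Nodup := by
    rw [hkeys]; exact PySem.List.nodup_dedup _
  rw [PySem.Dict.items_eq_map_keys D hnodup [], hkeys]
  apply List.map_congr_left
  intro k _
  simp only [hD, PySem.Dict.getD_foldl_modify_append, PySem.Dict.getD_empty, List.nil_append]

-- ===== VERDICT (by name: the statement is the Claim_ definition above) =====
theorem organize_cookies_by_domain_py_spec : Claim_equal_organize_cookies_by_domain_py := by
  intro cookies _
  unfold Spec_organize_cookies_by_domain_py
  exact organize_eq cookies
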